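-- pv_equiv track=rewrite | github.com/LHT02/KIGTTS | pc_trainer/app.py | _text_to_phoneme_ids
-- ===== SOURCE A (Python) =====
-- def _text_to_phoneme_ids(text: str, mapping: dict, id_map: dict) -> list[int]:
--     ids: list[int] = []
--     fallback = int(id_map.get("_", 0))
--     for ch in text:
--         if ch.isspace():
--             continue
--         phones = mapping.get(ch)
--         if phones:
--             for ph in phones:
--                 ids.append(int(id_map.get(ph, fallback)))
--         else:
--             ids.append(int(id_map.get(ch, fallback)))
--     return ids
-- ===== SOURCE B (Python) =====
-- def _text_to_phoneme_ids(text: str, mapping: dict, id_map: dict) -> list[int]: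
--     fallback = int(id_map.get("_", 0))
--
--     def block(ch):
--         phones = mapping.get(ch)
--         if phones:
--             return [int(id_map.get(ph, fallback)) for ph in phones]
--         return [int(id_map.get(ch, fallback))]
--
--     # build the id block once per DISTINCT non-space character, then
--     # concatenate precomputed blocks following the text
--     blocks = {ch: block(ch) for ch in set(text) if not ch.isspace()}
--     return [i for ch in text for i in blocks.get(ch, ())]
-- ===== Notes on version B (the rewrite author's own statement) =====
-- stated objective: alternative
-- what changed: B groups the work by distinct character: it precomputes a dict mapping each distinct non-space character of the text to its full id block (phones or the char itself, resolved through id_map once), then produces the output by concatenating these precomputed blocks along the text, so every repeated character reuses one cached lookup instead of redoing the mapping/id_map resolution per occurrence.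
import Mathlib
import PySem

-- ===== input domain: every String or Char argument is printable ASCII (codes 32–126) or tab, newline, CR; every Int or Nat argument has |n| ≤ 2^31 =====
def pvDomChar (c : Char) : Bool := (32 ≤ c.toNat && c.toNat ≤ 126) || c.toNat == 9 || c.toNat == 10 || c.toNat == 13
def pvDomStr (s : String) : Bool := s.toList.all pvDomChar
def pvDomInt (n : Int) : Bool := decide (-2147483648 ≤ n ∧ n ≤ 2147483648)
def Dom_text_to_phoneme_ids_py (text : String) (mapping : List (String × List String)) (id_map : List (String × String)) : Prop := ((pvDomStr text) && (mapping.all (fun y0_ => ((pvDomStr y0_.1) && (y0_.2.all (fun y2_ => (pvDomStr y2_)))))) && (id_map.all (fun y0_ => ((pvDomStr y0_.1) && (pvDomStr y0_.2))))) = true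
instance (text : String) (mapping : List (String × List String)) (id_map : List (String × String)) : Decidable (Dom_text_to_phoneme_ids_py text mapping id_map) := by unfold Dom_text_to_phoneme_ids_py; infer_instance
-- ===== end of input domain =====

-- B groups the work by distinct character: one dict of precomputed id blocks per distinct
-- non-space character, then the output is the concatenation of blocks along the text.
-- Objective: alternative (no speed claim). Return value only; neither version mutates its arguments.

-- int(id_map.get(k, fallback)) — appears verbatim in both sources; `.getD 0` is unreachable under Pre_
def pvIdOf (did : PySem.Dict String String) (fallback : Int) (k : String) : Int :=
  match did.get? k with
  | some v => (PySem.Int.ofStr? v).getD 0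
  | none => fallback

-- ===== PORT A =====
def text_to_phoneme_ids_py (text : String) (mapping : List (String × List String)) (id_map : List (String × String)) : List Int :=
  let dm := PySem.Dict.ofList mapping
  let did := PySem.Dict.ofList id_map
  let fallback : Int :=
    match did.get? "_" with
    | some v => (PySem.Int.ofStr? v).getD 0
    | none => 0
  text.toList.foldl (fun ids ch =>
    if PySem.Chars.isspace ch then ids
    else
      match dm.get? (String.ofList [ch]) with
      | some phones =>
          if phones.isEmpty then ids ++ [pvIdOf did fallback (String.ofList [ch])]
          else phones.foldl (fun ids ph => ids ++ [pvIdOf did fallback ph]) ids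
      | none => ids ++ [pvIdOf did fallback (String.ofList [ch])]) []

-- ===== PORT B =====
-- B's helper `block(ch)`: the id block of one character
def pvBlock (dm : PySem.Dict String (List String)) (did : PySem.Dict String String)
    (fallback : Int) (ch : Char) : List Int :=
  match dm.get? (String.ofList [ch]) with
  | some phones =>
      if phones.isEmpty then [pvIdOf did fallback (String.ofList [ch])]
      else phones.map (pvIdOf did fallback)
  | none => [pvIdOf did fallback (String.ofList [ch])]

def text_to_phoneme_ids_py_alt (text : String) (mapping : List (String × List String)) (id_map : List (String × String)) : List Int :=
  let dm := PySem.Dict.ofList mapping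
  let did := PySem.Dict.ofList id_map
  let fallback : Int :=
    match did.get? "_" with
    | some v => (PySem.Int.ofStr? v).getD 0
    | none => 0
  -- {ch: block(ch) for ch in set(text) if not ch.isspace()}
  let blocks : PySem.Dict Char (List Int) :=
    (PySem.Set.ofList text.toList).foldl
      (fun d ch => if PySem.Chars.isspace ch then d
                   else d.insert ch (pvBlock dm did fallback ch)) PySem.Dict.empty
  -- [i for ch in text for i in blocks.get(ch, ())]
  text.toList.flatMap (fun ch => blocks.getD ch [])

-- ===== PRECONDITION & SPEC =====
-- mapping.get(ch) or the char itself — the tokens a character contributes (used only to state Pre_)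
def pvTok (dm : PySem.Dict String (List String)) (ch : Char) : List String :=
  match dm.get? (String.ofList [ch]) with
  | some l => if l.isEmpty then [String.ofList [ch]] else l
  | none => [String.ofList [ch]]

-- true iff looking up k in did would not make int() raise (missing key ⇒ int fallback, fine)
def pvOk (did : PySem.Dict String String) (k : String) : Bool :=
  match did.get? k with
  | some v => (PySem.Int.ofStr? v).isSome
  | none => true

-- Pre_ excludes exactly the inputs on which Python A raises ValueError: int() applied to a
-- non-integer id_map value at a key the run actually queries ("_" or a token of the text).
def Pre_text_to_phoneme_ids_py (text : String) (mapping : List (String × List String)) (id_map : List (String × String)) : Prop :=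
  (pvOk (PySem.Dict.ofList id_map) "_"
    && text.toList.all (fun ch =>
        PySem.Chars.isspace ch
          || (pvTok (PySem.Dict.ofList mapping) ch).all (pvOk (PySem.Dict.ofList id_map)))) = true
instance (text : String) (mapping : List (String × List String)) (id_map : List (String × String)) : Decidable (Pre_text_to_phoneme_ids_py text mapping id_map) := by unfold Pre_text_to_phoneme_ids_py; infer_instance

def pvWitness_text_to_phoneme_ids_py : String × (List (String × List String)) × (List (String × String)) :=
  ("ab c", [("a", ["x", "y"])], [("x", "1"), ("_", "0")])

def Spec_text_to_phoneme_ids_py (text : String) (mapping : List (String × List String)) (id_map : List (String × String)) (out : List Int) : Prop := out = text_to_phoneme_ids_py_alt text mapping id_map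
instance (text : String) (mapping : List (String × List String)) (id_map : List (String × String)) (out : List Int) : Decidable (Spec_text_to_phoneme_ids_py text mapping id_map out) := by unfold Spec_text_to_phoneme_ids_py; infer_instance

-- ===== CLAIM =====
def Claim_equal_text_to_phoneme_ids_py : Prop := ∀ (text : String) (mapping : List (String × List String)) (id_map : List (String × String)), Dom_text_to_phoneme_ids_py text mapping id_map → Pre_text_to_phoneme_ids_py text mapping id_map → Spec_text_to_phoneme_ids_py text mapping id_map (text_to_phoneme_ids_py text mapping id_map)

-- ===== LEMMAS AND PROOFS =====

-- one character's block is its token list mapped through the id lookup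
theorem pv_block_eq (dm : PySem.Dict String (List String)) (did : PySem.Dict String String)
    (fallback : Int) (ch : Char) :
    pvBlock dm did fallback ch = (pvTok dm ch).map (pvIdOf did fallback) := by
  unfold pvBlock pvTok
  cases dm.get? (String.ofList [ch]) with
  | none => rfl
  | some l => by_cases h : l.isEmpty <;> simp [h]

-- A's loop, started from any accumulator, appends the tokenize-then-map canonical form
theorem pv_foldA (dm : PySem.Dict String (List String)) (did : PySem.Dict String String)
    (fallback : Int) (l : List Char) :
    ∀ acc : List Int,
      l.foldl (fun ids ch =>
        if PySem.Chars.isspace ch then ids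
        else
          match dm.get? (String.ofList [ch]) with
          | some phones =>
              if phones.isEmpty then ids ++ [pvIdOf did fallback (String.ofList [ch])]
              else phones.foldl (fun ids ph => ids ++ [pvIdOf did fallback ph]) ids
          | none => ids ++ [pvIdOf did fallback (String.ofList [ch])]) acc
      = acc ++ l.flatMap (fun ch => if PySem.Chars.isspace ch then []
                                    else (pvTok dm ch).map (pvIdOf did fallback)) := by
  induction l with
  | nil => intro acc; simp
  | cons ch tl ih =>
      intro acc
      by_cases hsp : PySem.Chars.isspace ch
      · rw [List.foldl_cons, if_pos hsp, ih]
        simp [hsp]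
      · rw [List.foldl_cons, if_neg hsp, ih]
        cases hget : dm.get? (String.ofList [ch]) with
        | none =>
            simp [pvTok, hget, hsp, List.append_assoc]
        | some phones =>
            by_cases hemp : phones.isEmpty
            · simp [pvTok, hget, hsp, List.append_assoc, List.isEmpty_iff.mp hemp]
            · have hne : phones ≠ [] := by simpa using hemp
              simp only [if_neg hemp]
              rw [PySem.List.foldl_append_singleton_eq_map]
              simp [pvTok, hget, hsp, hne, List.append_assoc]

-- lookup in B's block dict: built by inserting a value that depends only on the key
theorem pv_blocks_get (dm : PySem.Dict String (List String)) (did : PySem.Dict String String)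
    (fallback : Int) (s : List Char) (d : PySem.Dict Char (List Int)) (j : Char) :
    (s.foldl (fun d ch => if PySem.Chars.isspace ch then d
                          else d.insert ch (pvBlock dm did fallback ch)) d).get? j
      = if j ∈ s ∧ PySem.Chars.isspace j = false then some (pvBlock dm did fallback j)
        else d.get? j := by
  induction s generalizing d with
  | nil => simp
  | cons a tl ih =>
      rw [List.foldl_cons]
      by_cases hsp : PySem.Chars.isspace a
      · rw [if_pos hsp, ih]
        by_cases hj : j = a
        · subst hj; simp [hsp]
        · simp [hj]
      · rw [if_neg hsp, ih]
        by_cases hmem : j ∈ tl ∧ PySem.Chars.isspace j = false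
        · simp [hmem, List.mem_cons]
        · rw [if_neg hmem]
          by_cases hj : j = a
          · subst hj
            simp [PySem.Dict.get?_insert_self, eq_false_of_ne_true hsp]
          · rw [PySem.Dict.get?_insert_of_ne _ _ hj]
            simp only [List.mem_cons]
            rw [if_neg]
            rintro ⟨hc | hc, hns⟩
            · exact hj hc
            · exact hmem ⟨hc, hns⟩

-- ===== VERDICT =====
theorem text_to_phoneme_ids_py_spec : Claim_equal_text_to_phoneme_ids_py := by
  intro text mapping id_map _ _
  unfold Spec_text_to_phoneme_ids_py text_to_phoneme_ids_py text_to_phoneme_ids_py_alt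
  rw [pv_foldA]
  simp only [List.nil_append]
  apply (List.flatMap_congr ?_).symm
  intro ch hch
  rw [PySem.Dict.getD_eq_get?_getD, pv_blocks_get]
  by_cases hsp : PySem.Chars.isspace ch
  · simp [hsp]
  · have : ch ∈ PySem.Set.ofList text.toList := by
      rw [PySem.Set.mem_ofList]; exact hch
    simp [this, eq_false_of_ne_true hsp, pv_block_eq]
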